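-- pv_equiv track=rewrite | github.com/spiacy-lin/erpenh | model/crm/crm.py | get_longest_name_id
-- ===== SOURCE A (Python) =====
-- def get_longest_name_id(table):
--     list_of_longest_names = []
--     longest_name = len(table[1][1])
--     for i in range(2,len(table)):
--         if len(table[i][1]) > longest_name:
--             longest_name = len(table[i][1])
--     for j in range(1,len(table)):
--         if len(table[j][1]) == longest_name:
--             list_of_longest_names.append(table[j][0])
--     list_of_longest_names.sort()
--     return list_of_longest_names
-- ===== SOURCE B (Python) =====
-- def get_longest_name_id(table):
--     groups = {}
--     for row in table[1:]:
--         groups.setdefault(len(row[1]), []).append(row[0])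
--     return sorted(groups[max(groups)])
-- ===== Notes on version B (the rewrite author's own statement) =====
-- stated objective: alternative
-- what changed: Replaces A's two separate index-loop scans (running max, then filter by that max) with a single pass that groups ids by name length in a dict, then looks up the max key and sorts its id list.
import Mathlib
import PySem

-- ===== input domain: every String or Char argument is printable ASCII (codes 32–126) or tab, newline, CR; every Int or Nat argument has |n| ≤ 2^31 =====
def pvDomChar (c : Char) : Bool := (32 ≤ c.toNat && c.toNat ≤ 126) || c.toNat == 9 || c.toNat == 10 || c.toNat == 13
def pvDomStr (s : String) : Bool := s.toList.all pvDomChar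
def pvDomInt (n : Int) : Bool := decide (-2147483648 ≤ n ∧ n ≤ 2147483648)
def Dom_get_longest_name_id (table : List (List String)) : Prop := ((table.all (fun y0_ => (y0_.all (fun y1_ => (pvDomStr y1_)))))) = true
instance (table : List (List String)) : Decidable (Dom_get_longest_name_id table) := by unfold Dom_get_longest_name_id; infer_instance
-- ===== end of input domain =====

-- B replaces A's two separate scans (running max of name lengths, then a filter by that max)
-- by one grouping pass (dict: name length -> ids) plus a lookup of the max key; same result, same asymptotic cost.

-- ===== PORT A =====
def get_longest_name_id (table : List (List String)) : List String :=
  let longest0 := PySem.Str.len (PySem.List.pyGetD (PySem.List.pyGetD table 1 []) 1 "")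
  let longest := (PySem.List.pyRange 2 (PySem.List.len table)).foldl
      (fun ln j =>
        if PySem.Str.len (PySem.List.pyGetD (PySem.List.pyGetD table j []) 1 "") > ln
        then PySem.Str.len (PySem.List.pyGetD (PySem.List.pyGetD table j []) 1 "")
        else ln) longest0
  let names := (PySem.List.pyRange 1 (PySem.List.len table)).foldl
      (fun acc j =>
        if PySem.Str.len (PySem.List.pyGetD (PySem.List.pyGetD table j []) 1 "") == longest
        then acc ++ [PySem.List.pyGetD (PySem.List.pyGetD table j []) 0 ""]
        else acc) []
  PySem.List.sorted names (fun x => x)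

-- ===== PORT B =====
def get_longest_name_id_alt (table : List (List String)) : List String :=
  let rows := PySem.List.slice table (some 1)
  let groups : PySem.Dict Int (List String) :=
    rows.foldl (fun d row =>
      d.modify (PySem.Str.len (PySem.List.pyGetD row 1 "")) []
        (· ++ [PySem.List.pyGetD row 0 ""])) PySem.Dict.empty
  match PySem.List.max? groups.keys (fun k => k) with
  | some m => PySem.List.sorted (groups.getD m []) (fun x => x)
  | none => []

-- ===== PRECONDITION & SPEC =====
-- Pre_ excludes exactly the inputs on which A raises: tables with fewer than two rows
-- (A indexes table[1] at once) and tables where some row after the header lacks index 0 or 1.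
def Pre_get_longest_name_id (table : List (List String)) : Prop :=
  2 ≤ table.length ∧ ∀ row ∈ table.drop 1, 2 ≤ row.length
instance (table : List (List String)) : Decidable (Pre_get_longest_name_id table) := by
  unfold Pre_get_longest_name_id; infer_instance

def pvWitness_get_longest_name_id : List (List String) :=
  [["id", "name"], ["3", "bob"], ["1", "alice"], ["2", "carol"]]

def Spec_get_longest_name_id (table : List (List String)) (out : List String) : Prop := out = get_longest_name_id_alt table
instance (table : List (List String)) (out : List String) : Decidable (Spec_get_longest_name_id table out) := by unfold Spec_get_longest_name_id; infer_instance

-- ===== CLAIM (what is proved, stated in full; the proofs are below) =====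
def Claim_equal_get_longest_name_id : Prop := ∀ (table : List (List String)), Dom_get_longest_name_id table → Pre_get_longest_name_id table → Spec_get_longest_name_id table (get_longest_name_id table)

-- ===== LEMMAS AND PROOFS =====

-- max? with identity key returns exactly the maximum value when one exists
lemma max?_id_eq_some {xs : List Int} {m : Int} (hm : m ∈ xs) (hub : ∀ y ∈ xs, y ≤ m) :
    PySem.List.max? xs (fun y => y) = some m := by
  cases h : PySem.List.max? xs (fun y => y) with
  | none =>
      rw [PySem.List.max?_eq_none_iff] at h
      simp [h] at hm
  | some m' =>
      have h1 := PySem.List.max?_mem h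
      have h2 := PySem.List.max?_isMax h
      exact congrArg some (le_antisymm (hub m' h1) (h2 m hm))

theorem get_longest_name_id_spec_aux (table : List (List String))
    (hpre : Pre_get_longest_name_id table) :
    get_longest_name_id table = get_longest_name_id_alt table := by
  obtain ⟨hlen, -⟩ := hpre
  match table with
  | [] => simp at hlen
  | [t0] => simp at hlen
  | t0 :: r :: rest =>
  set f : List String → Int := fun row => PySem.Str.len (PySem.List.pyGetD row 1 "") with hf
  set g : List String → String := fun row => PySem.List.pyGetD row 0 "" with hg
  set rows : List (List String) := r :: rest with hrows
  -- the maximum name length, as A computes it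
  set longest : Int := (rest.map f).foldl max (f r) with hlongest
  have hmem : longest ∈ rows.map f := by
    rcases PySem.List.foldl_max_mem (rest.map f) (f r) with h | h
    · rw [hlongest, h]; simp [hrows]
    · rw [hlongest]; simp only [hrows, List.map_cons, List.mem_cons]; right; exact h
  have hub : ∀ y ∈ rows.map f, y ≤ longest := by
    intro y hy
    simp only [hrows, List.map_cons, List.mem_cons] at hy
    rcases hy with h | h
    · rw [h, hlongest]; exact (PySem.List.le_foldl_max (rest.map f) (f r)).1
    · rw [hlongest]; exact (PySem.List.le_foldl_max (rest.map f) (f r)).2 y h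
  -- A's running-max loop computes `longest`
  have hA1 : (PySem.List.pyRange 2 (PySem.List.len (t0 :: r :: rest))).foldl
      (fun ln j =>
        if PySem.Str.len (PySem.List.pyGetD (PySem.List.pyGetD (t0 :: r :: rest) j []) 1 "") > ln
        then PySem.Str.len (PySem.List.pyGetD (PySem.List.pyGetD (t0 :: r :: rest) j []) 1 "")
        else ln)
      (PySem.Str.len (PySem.List.pyGetD (PySem.List.pyGetD (t0 :: r :: rest) 1 []) 1 "")) = longest := by
    rw [PySem.List.foldl_pyRange_pyGetD (t0 :: r :: rest) []
      (fun ln row => if f row > ln then f row else ln) _ (by norm_num)]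
    have hget1 : PySem.List.pyGetD (t0 :: r :: rest) 1 [] = r := by
      rw [PySem.List.pyGetD_ofNat']; rfl
    rw [hget1]
    show rest.foldl (fun ln row => if f row > ln then f row else ln) (f r) = longest
    rw [hlongest, List.foldl_map]
    have hfun : (fun (ln : Int) (row : List String) => if f row > ln then f row else ln)
        = fun ln row => max ln (f row) := by
      funext a b; simp only [max_def]; split_ifs <;> omega
    rw [hfun]
  -- A's collecting loop is filter-then-map over the rows
  have hA2 : ∀ (L : Int), (PySem.List.pyRange 1 (PySem.List.len (t0 :: r :: rest))).foldl
      (fun acc j =>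
        if PySem.Str.len (PySem.List.pyGetD (PySem.List.pyGetD (t0 :: r :: rest) j []) 1 "") == L
        then acc ++ [PySem.List.pyGetD (PySem.List.pyGetD (t0 :: r :: rest) j []) 0 ""]
        else acc) ([] : List String)
      = (rows.filter (fun row => f row == L)).map g := by
    intro L
    rw [PySem.List.foldl_pyRange_pyGetD (t0 :: r :: rest) []
      (fun acc row => if f row == L then acc ++ [g row] else acc) _ (by norm_num)]
    show rows.foldl (fun acc row => if f row == L then acc ++ [g row] else acc) [] = _
    rw [PySem.List.foldl_append_if (fun row => f row == L) g rows []]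
    simp
  -- B's dict has the name lengths as keys
  set groups : PySem.Dict Int (List String) :=
    rows.foldl (fun d row => d.modify (f row) [] (· ++ [g row])) PySem.Dict.empty with hgroups
  have hkeys : groups.keys = PySem.Set.ofList (rows.map f) := by
    rw [hgroups, PySem.Dict.keys_foldl_modify_key rows f [] (fun _ row v => v ++ [g row]),
      PySem.Dict.keys_empty, PySem.Set.update_nil_left]
  have hmax : PySem.List.max? groups.keys (fun k => k) = some longest := by
    rw [hkeys]
    exact max?_id_eq_some ((PySem.Set.mem_ofList _ _).mpr hmem)
      (fun y hy => hub y ((PySem.Set.mem_ofList _ _).mp hy))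
  -- B's group at any key is the filter-then-map of the rows
  have hgetD : ∀ (L : Int), groups.getD L [] = (rows.filter (fun row => f row == L)).map g := by
    intro L
    have hfold : rows.foldl (fun d row => d.modify (f row) [] (· ++ [g row])) PySem.Dict.empty
        = (rows.map (fun row => (f row, g row))).foldl
            (fun d p => d.modify p.1 [] (· ++ [p.2])) PySem.Dict.empty := by
      rw [List.foldl_map]
    rw [hgroups, hfold, PySem.Dict.getD_foldl_modify_append]
    simp [List.filter_map, Function.comp_def, List.map_map]
  -- assemble both sides
  show PySem.List.sorted _ (fun x => x) = get_longest_name_id_alt (t0 :: r :: rest)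
  rw [hA1, hA2 longest]
  unfold get_longest_name_id_alt
  rw [PySem.List.slice_from (t0 :: r :: rest) (by norm_num)]
  show PySem.List.sorted ((rows.filter (fun row => f row == longest)).map g) (fun x => x)
      = match PySem.List.max? groups.keys (fun k => k) with
        | some m => PySem.List.sorted (groups.getD m []) (fun x => x)
        | none => []
  rw [hmax]
  show PySem.List.sorted ((rows.filter (fun row => f row == longest)).map g) (fun x => x)
      = PySem.List.sorted (groups.getD longest []) (fun x => x)
  rw [hgetD longest]

-- ===== VERDICT (by name: the statement is the Claim_ definition above) =====
theorem get_longest_name_id_spec : Claim_equal_get_longest_name_id := by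
  intro table _ hpre
  exact get_longest_name_id_spec_aux table hpre
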